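-- pv_equiv track=rewrite | github.com/EduMarck/Analise-Lexica-compilador | scanner.py | RemoverComentarios
-- ===== SOURCE A (Python) =====
-- def RemoverComentarios(file):
--    fileSemComentarios = ""
--    isComentario = False
--
--    for char in file:
--       if char == '#':
--          isComentario = True
--       elif char == '~':
--          isComentario = False
--       if not isComentario:
--          fileSemComentarios+=char
--
--    return fileSemComentarios
-- ===== SOURCE B (Python) =====
-- def RemoverComentarios(file):
--     out = []
--     i, n = 0, len(file)
--     while i < n:
--         c = file[i]
--         i += 1
--         if c == '#':
--             # skip to (but not past) the next '~'
--             while i < n and file[i] != '~':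
--                 i += 1
--         else:
--             out.append(c)
--     return ''.join(out)
-- ===== Notes on version B (the rewrite author's own statement) =====
-- stated objective: alternative
-- what changed: Replaces the single-pass boolean comment-flag state machine with an index-based segment skipper: on '#' an inner loop jumps straight to the next '~', and kept characters are collected in a list joined once at the end.
import Mathlib
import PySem

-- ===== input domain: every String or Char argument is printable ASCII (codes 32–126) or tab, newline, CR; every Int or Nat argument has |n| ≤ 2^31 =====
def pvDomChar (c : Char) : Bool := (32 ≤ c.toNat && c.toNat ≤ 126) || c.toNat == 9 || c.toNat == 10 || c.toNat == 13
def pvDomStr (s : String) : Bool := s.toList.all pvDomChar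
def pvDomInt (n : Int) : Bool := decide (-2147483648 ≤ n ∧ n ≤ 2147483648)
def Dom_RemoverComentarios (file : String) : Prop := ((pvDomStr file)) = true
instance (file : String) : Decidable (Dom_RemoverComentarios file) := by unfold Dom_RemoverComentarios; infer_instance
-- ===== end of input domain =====

-- B replaces A's boolean comment-flag state machine with an index-based skipper:
-- on '#' it jumps to the next '~' and collects kept characters (return value only).
-- ===== PORT A =====
def aStep (st : List Char × Bool) (char : Char) : List Char × Bool :=
  let isComentario : Bool := if char = '#' then true else if char = '~' then false else st.2
  (if isComentario = false then st.1 ++ [char] else st.1, isComentario)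

def RemoverComentarios (file : String) : String :=
  String.mk ((file.toList.foldl aStep ([], false)).1)

-- ===== PORT B =====
-- inner while: advance past non-'~' characters
def altSkip : List Char → List Char
  | [] => []
  | c :: rest => if c ≠ '~' then altSkip rest else c :: rest

def altGo : List Char → List Char
  | [] => []
  | c :: rest =>
    if c = '#' then altGo (altSkip rest)
    else c :: altGo rest
termination_by l => l.length
decreasing_by
  · exact Nat.lt_succ_of_le (by
      induction rest with
      | nil => simp [altSkip]
      | cons d ds ih =>
        simp only [altSkip]
        split
        · exact Nat.le_succ_of_le ih
        · simp)
  · simp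

def RemoverComentarios_alt (file : String) : String := String.mk (altGo file.toList)

-- ===== PRECONDITION & SPEC =====
def Spec_RemoverComentarios (file : String) (out : String) : Prop := out = RemoverComentarios_alt file
instance (file : String) (out : String) : Decidable (Spec_RemoverComentarios file out) := by unfold Spec_RemoverComentarios; infer_instance

-- ===== CLAIM (what is proved, stated in full; the proofs are below) =====
def Claim_equal_RemoverComentarios : Prop := ∀ (file : String), Dom_RemoverComentarios file → Spec_RemoverComentarios file (RemoverComentarios file)

-- ===== LEMMAS AND PROOFS =====
lemma fold_both (l : List Char) :
    (∀ acc, (l.foldl aStep (acc, false)).1 = acc ++ altGo l) ∧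
    (∀ acc, (l.foldl aStep (acc, true)).1 = acc ++ altGo (altSkip l)) := by
  induction l with
  | nil => simp [altGo, altSkip]
  | cons c rest ih =>
    constructor
    · intro acc
      by_cases h1 : c = '#'
      · simp [List.foldl, aStep, h1, altGo, ih.2]
      · by_cases h2 : c = '~' <;>
          simp [List.foldl, aStep, h1, h2, altGo, ih.1]
    · intro acc
      by_cases h2 : c = '~'
      · simp [List.foldl, aStep, h2, altSkip, altGo, ih.1]
      · by_cases h1 : c = '#' <;>
          simp [List.foldl, aStep, h1, h2, altSkip, ih.2]

-- ===== VERDICT (by name: the statement is the Claim_ definition above) =====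
theorem RemoverComentarios_spec : Claim_equal_RemoverComentarios := by
  intro file _
  show _ = _
  simp [RemoverComentarios, RemoverComentarios_alt, (fold_both file.toList).1]
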